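-- pv_equiv track=rewrite | github.com/TianyangHan/ANU_Prohect | COMP6730/final/first_digit_freqs.py | first_digit_freqs
-- ===== SOURCE A (Python) =====
-- def first_digit_freqs(b, n):
--     '''Computes and returns frequencies of the first digits in b^i, i=1..n sequence'''
--     freqs = {k:v for k,v in zip(range(1,10), [0]*9)}
--     lst = []
--     for i in range(n):
--         lst.append(int(str(b**i)[0]))       # get first digit for all the element and add to the list
--     for j in lst:
--         freqs[j]+=1
--     return freqs
-- ===== SOURCE B (Python) =====
-- def first_digit_freqs(b, n):
--     '''Computes and returns frequencies of the first digits in b^i, i=1..n sequence'''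
--     freqs = {k: 0 for k in range(1, 10)}
--     cur = 1
--     p = 1            # largest power of 10 not exceeding cur
--     for _ in range(n):
--         while p * 10 <= cur:
--             p *= 10
--         freqs[cur // p] += 1
--         cur *= b
--     return freqs
-- ===== Notes on version B (the rewrite author's own statement) =====
-- stated objective: faster
-- what changed: Single pass with a running product cur *= b tallied straight into the dict, instead of recomputing b**i from scratch each iteration and collecting all first digits into an intermediate list counted by a second loop.
import Mathlib
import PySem

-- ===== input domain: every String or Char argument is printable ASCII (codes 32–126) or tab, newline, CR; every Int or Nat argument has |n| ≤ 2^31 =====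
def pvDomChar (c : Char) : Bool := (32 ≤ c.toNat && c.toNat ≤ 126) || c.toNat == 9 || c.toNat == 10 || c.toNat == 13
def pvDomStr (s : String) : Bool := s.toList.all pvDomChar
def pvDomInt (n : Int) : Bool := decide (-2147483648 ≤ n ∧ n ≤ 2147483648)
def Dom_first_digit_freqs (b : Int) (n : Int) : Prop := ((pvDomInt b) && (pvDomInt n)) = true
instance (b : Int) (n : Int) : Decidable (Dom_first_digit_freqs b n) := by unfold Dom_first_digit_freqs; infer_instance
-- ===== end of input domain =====

-- B replaces A's per-iteration exponentiation b**i, intermediate list and second counting loop by a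
-- single pass with a running product and an incrementally maintained power of 10 (objective: faster).

-- ===== PORT A =====
-- 'freqs[j] += 1' is ported as Dict.modify (a Python KeyError for j ∉ 1..9 is excluded by Pre_).
def first_digit_freqs (b : Int) (n : Int) : List (Int × Int) :=
  let freqs : PySem.Dict Int Int :=
    ((PySem.List.pyRange 1 10 1).zip (PySem.List.pyRepeat [(0 : Int)] 9)).foldl
      (fun d kv => d.insert kv.1 kv.2) PySem.Dict.empty
  let lst : List Int :=
    (PySem.List.pyRange 0 n 1).foldl
      (fun l i =>
        l ++ [((PySem.Str.pyGet? (PySem.Int.toStr (b ^ i.toNat)) 0).bind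
                (fun c => PySem.Int.ofChars? [c])).getD 0]) []
  (lst.foldl (fun d j => d.modify j 0 (· + 1)) freqs).items

-- ===== PORT B =====
-- the 'while p * 10 <= cur: p *= 10' loop of Source B; the '0 < p' guard only makes the recursion
-- well-founded (p is always a positive power of 10 at the call sites).
def pvGrowP (cur p : Int) : Int :=
  if h : 0 < p ∧ p * 10 ≤ cur then pvGrowP cur (p * 10) else p
termination_by (cur - p).toNat
decreasing_by omega

-- 'freqs[d] += 1' ported as Dict.modify, as in port A (KeyError excluded by Pre_).
def first_digit_freqs_alt (b : Int) (n : Int) : List (Int × Int) :=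
  let freqs : PySem.Dict Int Int :=
    (PySem.List.pyRange 1 10 1).foldl (fun d k => d.insert k 0) PySem.Dict.empty
  let st := (PySem.List.pyRange 0 n 1).foldl
    (fun (st : PySem.Dict Int Int × Int × Int) _ =>
      let p := pvGrowP st.2.1 st.2.2
      (st.1.modify (PySem.Int.floordiv st.2.1 p) 0 (· + 1), st.2.1 * b, p))
    (freqs, 1, 1)
  st.1.items

-- ===== PRECONDITION & SPEC =====
-- Pre_ excludes exactly the inputs where the Python A raises: for b ≤ 0 and n ≥ 2 the string of
-- b**1 starts with '-' (ValueError in int()) or, for b = 0, the first digit 0 is a KeyError.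
def Pre_first_digit_freqs (b : Int) (n : Int) : Prop := 1 ≤ b ∨ n ≤ 1
instance (b : Int) (n : Int) : Decidable (Pre_first_digit_freqs b n) := by
  unfold Pre_first_digit_freqs; infer_instance
def pvWitness_first_digit_freqs : Int × Int := (2, 6)
def Spec_first_digit_freqs (b : Int) (n : Int) (out : List (Int × Int)) : Prop := out = first_digit_freqs_alt b n
instance (b : Int) (n : Int) (out : List (Int × Int)) : Decidable (Spec_first_digit_freqs b n out) := by unfold Spec_first_digit_freqs; infer_instance

-- ===== CLAIM (what is proved, stated in full; the proofs are below) =====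
def Claim_equal_first_digit_freqs : Prop := ∀ (b : Int) (n : Int), Dom_first_digit_freqs b n → Pre_first_digit_freqs b n → Spec_first_digit_freqs b n (first_digit_freqs b n)

-- ===== LEMMAS AND PROOFS =====

-- leading decimal digit by repeated division (proof-side characterisation shared by both ports)
def pvLead (m : Nat) : Nat :=
  if h : m < 10 then m else pvLead (m / 10)
decreasing_by exact Nat.div_lt_self (by omega) (by omega)

-- the decimal digit characters of m, most significant first (what Nat.toDigits 10 computes)
def pvRep (m : Nat) : List Char :=
  if _h : m < 10 then [Nat.digitChar m] else pvRep (m / 10) ++ [Nat.digitChar (m % 10)]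
decreasing_by exact Nat.div_lt_self (by omega) (by omega)

lemma pvRep_core (fuel : Nat) : ∀ (n : Nat) (ds : List Char), n < fuel →
    Nat.toDigitsCore 10 fuel n ds = pvRep n ++ ds := by
  induction fuel with
  | zero => intro n ds h; omega
  | succ f ih =>
    intro n ds h
    rw [Nat.toDigitsCore]
    by_cases h10 : n < 10
    · have : n / 10 = 0 := by omega
      simp [this, pvRep, h10, Nat.mod_eq_of_lt h10]
    · have h0 : ¬ n / 10 = 0 := by omega
      simp only [h0, if_false]
      rw [ih (n / 10) _ (by omega)]
      conv_rhs => rw [pvRep]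
      simp [h10]

lemma toDigits_eq_pvRep (n : Nat) : Nat.toDigits 10 n = pvRep n := by
  rw [Nat.toDigits, pvRep_core (n + 1) n [] (by omega), List.append_nil]

lemma pvRep_head (m : Nat) : ∃ t, pvRep m = Nat.digitChar (pvLead m) :: t := by
  fun_induction pvLead m with
  | case1 m h => exact ⟨[], by rw [pvRep]; simp [h]⟩
  | case2 m h ih =>
    obtain ⟨t, ht⟩ := ih
    exact ⟨t ++ [Nat.digitChar (m % 10)], by rw [pvRep]; simp [h, ht]⟩

lemma pvLead_lt (m : Nat) : pvLead m < 10 := by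
  fun_induction pvLead m with
  | case1 m h => exact h
  | case2 m h ih => exact ih

-- int(str(m)[0]) = pvLead m, for every natural m
lemma fd_eq_pvLead (m : Nat) :
    ((PySem.Str.pyGet? (PySem.Int.toStr (m : Int)) 0).bind
      (fun c => PySem.Int.ofChars? [c])).getD 0 = (pvLead m : Int) := by
  obtain ⟨t, ht⟩ := pvRep_head m
  have h1 : (PySem.Int.toStr (m : Int)).toList = pvRep m := by
    rw [PySem.Int.toList_toStr, PySem.Int.toChars]
    simp [toDigits_eq_pvRep]
  have h2 : PySem.Str.pyGet? (PySem.Int.toStr (m : Int)) 0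
      = some (Nat.digitChar (pvLead m)) := by
    rw [PySem.Str.pyGet?]
    rw [h1, ht]
    exact PySem.List.pyGet?_zero_cons _ _
  rw [h2]
  have hlt := pvLead_lt m
  interval_cases h : pvLead m <;> simp_all <;> decide

lemma pvLead_div (k : Nat) : ∀ m : Nat, 10 ^ k ≤ m → m < 10 ^ (k + 1) → m / 10 ^ k = pvLead m := by
  induction k with
  | zero =>
    intro m h1 h2
    rw [pvLead]
    simp at h2 ⊢
    simp [h2]
  | succ k ih =>
    intro m h1 h2
    have h10 : ¬ m < 10 := by
      have : (10:Nat) ≤ 10 ^ (k+1) := Nat.le_self_pow (by omega) 10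
      omega
    rw [pvLead]
    simp only [h10, dif_neg, not_false_iff]
    rw [← ih (m / 10) (Nat.le_div_iff_mul_le (by omega) |>.2 (by rw [← pow_succ]; exact h1))
        (Nat.div_lt_iff_lt_mul (by omega) |>.2 (by rw [← pow_succ]; exact h2))]
    rw [Nat.div_div_eq_div_mul, ← pow_succ']

-- the grow loop returns the power of 10 in (c/10, c], and dividing by it gives pvLead
lemma grow_spec (c p : Int) (hc : 0 < c) : ∀ k : Nat, p = 10 ^ k → p ≤ c →
    ∃ k' : Nat, pvGrowP c p = 10 ^ k' ∧ pvGrowP c p ≤ c ∧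
      PySem.Int.floordiv c (pvGrowP c p) = (pvLead c.toNat : Int) := by
  fun_induction pvGrowP c p with
  | case1 p h ih =>
    intro k hk hpc
    exact ih (k + 1) (by rw [hk, pow_succ]) h.2
  | case2 p h =>
    intro k hk hpc
    have hp0 : (0:Int) < p := by rw [hk]; positivity
    have hlt : c < p * 10 := by
      rcases not_and_or.1 h with h' | h' <;> omega
    refine ⟨k, hk, hpc, ?_⟩
    rw [PySem.Int.floordiv_eq_ediv_of_pos hp0]
    have hcn : c = ((c.toNat : Nat) : Int) := by omega
    have h1 : (10:Nat) ^ k ≤ c.toNat := by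
      have : ((10:Nat) ^ k : Int) ≤ c := by push_cast; rw [← hk]; exact hpc
      omega
    have h2 : c.toNat < 10 ^ (k + 1) := by
      have : c < ((10:Nat) ^ (k+1) : Int) := by push_cast [pow_succ]; rw [← hk]; exact hlt
      omega
    rw [hcn, hk]
    rw [show ((10:Int) ^ k) = (((10:Nat) ^ k : Nat) : Int) by push_cast; ring]
    rw [← Int.natCast_div]
    rw [pvLead_div k c.toNat h1 h2]
    simp only [Int.toNat_natCast]

-- a fold whose function ignores the elements does not care about a map over the list
lemma pvFoldl_map_ignore {α β σ : Type} (g : α → β) (f : σ → σ) (l : List α) (s : σ) :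
    (l.map g).foldl (fun st _ => f st) s = l.foldl (fun st _ => f st) s := by
  induction l generalizing s with
  | nil => rfl
  | cons x xs ih => simp only [List.map_cons, List.foldl_cons]; exact ih _

-- B's single pass over range m, started at cur = c ≥ p = 10^k, tallies pvLead (c * a^i)
lemma stepsB (a : Nat) (ha : 1 ≤ a) (b : Int) (hb : b = (a : Int)) (m : Nat) :
    ∀ (d : PySem.Dict Int Int) (c k : Nat), 1 ≤ c → 10 ^ k ≤ c →
    ((List.range m).foldl
      (fun (st : PySem.Dict Int Int × Int × Int) (_ : Nat) =>
        (st.1.modify (PySem.Int.floordiv st.2.1 (pvGrowP st.2.1 st.2.2)) 0 (· + 1),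
         st.2.1 * b, pvGrowP st.2.1 st.2.2))
      (d, (c : Int), ((10 ^ k : Nat) : Int))).1
    = ((List.range m).map (fun i => (pvLead (c * a ^ i) : Int))).foldl
        (fun d j => d.modify j 0 (· + 1)) d := by
  induction m with
  | zero => intro d c k _ _; simp
  | succ m ih =>
    intro d c k hc hkc
    have hc0 : (0:Int) < (c:Int) := by exact_mod_cast hc
    have hpk : ((10 ^ k : Nat) : Int) = (10:Int) ^ k := by push_cast; ring
    have hpc : ((10 ^ k : Nat) : Int) ≤ (c : Int) := by exact_mod_cast hkc
    obtain ⟨k', hk', hle, hdiv⟩ :=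
      grow_spec (c:Int) ((10 ^ k : Nat) : Int) hc0 k hpk hpc
    have hp' : pvGrowP (c:Int) ((10 ^ k : Nat) : Int) = ((10 ^ k' : Nat) : Int) := by
      rw [hk']; push_cast; ring
    have hcur : (c : Int) * b = ((c * a : Nat) : Int) := by rw [hb]; push_cast; ring
    have hle' : (10:Nat) ^ k' ≤ c := by rw [hp'] at hle; exact_mod_cast hle
    have h2 : 10 ^ k' ≤ c * a := le_trans hle' (Nat.le_mul_of_pos_right c ha)
    rw [List.range_succ_eq_map]
    simp only [List.foldl_cons, List.map_cons, List.map_map]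
    rw [pvFoldl_map_ignore Nat.succ
      (fun st : PySem.Dict Int Int × Int × Int =>
        (st.1.modify (PySem.Int.floordiv st.2.1 (pvGrowP st.2.1 st.2.2)) 0 (· + 1),
         st.2.1 * b, pvGrowP st.2.1 st.2.2))]
    rw [hdiv, hcur, hp']
    rw [ih (PySem.Dict.modify d ((pvLead ((c:Int)).toNat : Nat) : Int) 0 (· + 1))
        (c * a) k' (Nat.mul_pos hc ha) h2]
    simp only [Int.toNat_natCast]
    rw [List.foldl_map]
    have e0 : c * a ^ 0 = c := by simp
    rw [e0]
    rw [List.foldl_map]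
    apply PySem.List.foldl_congr_mem
    intro acc x _
    have hx : c * a * a ^ x = c * a ^ (x + 1) := by rw [pow_succ]; ring
    simp [Function.comp, hx, Nat.succ_eq_add_one]

lemma pyRange_zero_toNat (n : Int) :
    PySem.List.pyRange 0 n 1 = (List.range n.toNat).map (fun k : Nat => (k : Int)) := by
  by_cases h : 0 ≤ n
  · obtain ⟨m, rfl⟩ : ∃ m : Nat, n = (m : Int) := ⟨n.toNat, (Int.toNat_of_nonneg h).symm⟩
    rw [PySem.List.pyRange_zero_natCast]
    simp only [Int.toNat_natCast]
  · have h0 : n.toNat = 0 := by omega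
    have h1 : ¬ (0:Int) < n := by omega
    simp [PySem.List.pyRange, h0, h1]

-- ===== VERDICT (by name: the statement is the Claim_ definition above) =====
theorem first_digit_freqs_spec : Claim_equal_first_digit_freqs := by
  intro b n _ hpre
  unfold Spec_first_digit_freqs
  simp only [first_digit_freqs, first_digit_freqs_alt]
  have hinit :
      ((PySem.List.pyRange 1 10 1).zip (PySem.List.pyRepeat [(0 : Int)] 9)).foldl
        (fun d kv => d.insert kv.1 kv.2) PySem.Dict.empty
      = (PySem.List.pyRange 1 10 1).foldl
          (fun (d : PySem.Dict Int Int) k => d.insert k 0) PySem.Dict.empty := by decide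
  rw [hinit]
  rw [PySem.List.foldl_append_singleton_eq_map, List.nil_append]
  rw [pyRange_zero_toNat, List.map_map]
  rw [pvFoldl_map_ignore (fun k : Nat => (k : Int))
      (fun st : PySem.Dict Int Int × Int × Int =>
        (st.1.modify (PySem.Int.floordiv st.2.1 (pvGrowP st.2.1 st.2.2)) 0 (· + 1),
         st.2.1 * b, pvGrowP st.2.1 st.2.2))]
  by_cases hb : 1 ≤ b
  · -- main case: b ≥ 1
    obtain ⟨a, rfl⟩ : ∃ a : Nat, b = (a : Int) := ⟨b.toNat, by omega⟩
    have ha : 1 ≤ a := by exact_mod_cast hb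
    have hmap : ∀ k ∈ List.range n.toNat,
        ((fun i : Int => ((PySem.Str.pyGet? (PySem.Int.toStr ((a : Int) ^ i.toNat)) 0).bind
            (fun c => PySem.Int.ofChars? [c])).getD 0) ∘ (fun k : Nat => (k : Int))) k
        = (fun k : Nat => (pvLead (a ^ k) : Int)) k := by
      intro k _
      simp only [Function.comp, Int.toNat_natCast]
      rw [show ((a : Int) ^ k) = ((a ^ k : Nat) : Int) by push_cast; ring]
      exact fd_eq_pvLead (a ^ k)
    rw [List.map_congr_left hmap]
    have hsb := stepsB a ha (a : Int) rfl n.toNat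
      ((PySem.List.pyRange 1 10 1).foldl
        (fun (d : PySem.Dict Int Int) k => d.insert k 0) PySem.Dict.empty) 1 0 le_rfl (by norm_num)
    norm_num at hsb
    rw [hsb]
  · -- b ≤ 0: Pre_ forces n ≤ 1, and only the first digit of b^0 = 1 is ever tallied
    have hn : n ≤ 1 := hpre.resolve_left hb
    by_cases hn0 : n ≤ 0
    · have h0 : n.toNat = 0 := by omega
      simp [h0]
    · have h1 : n.toNat = 1 := by omega
      rw [h1]
      simp only [List.range_one, List.map_cons, List.map_nil, List.foldl_cons, List.foldl_nil,
        Function.comp, Nat.cast_zero]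
      rw [pvGrowP]
      norm_num
      decide
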